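-- pv_equiv track=rewrite | github.com/keremuzer/bbm103 | board_game/assignment3.py | delete_cells
-- ===== SOURCE A (Python) =====
-- def delete_cells(board, visited):
--     """Deletes visited cells and shifts the cells and columns"""
--     new_board = [row[:] for row in board]
--
--     # replace the values of the visited cells with None
--     for i in visited:
--         new_board[i[0]][i[1]] = None
--
--     # shift the cells vertically
--     for j in range(len(new_board[0])):
--         non_empty_cells = [new_board[k][j] for k in range(len(new_board)) if new_board[k][j] is not None]
--         for k in range(len(board) - 1, -1, -1):
--             new_board[k][j] = non_empty_cells.pop() if non_empty_cells else None
--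
--     # remove empty rows
--     new_board = [row for row in new_board if any(cell is not None for cell in row)]
--
--     # shift columns to left
--     non_empty_cols = [col for col in range(len(new_board[0])) if any(row[col] is not None for row in new_board)]
--     new_board = [[new_board[row][col] for col in non_empty_cols] for row in range(len(new_board))]
--
--     return new_board
-- ===== SOURCE B (Python) =====
-- def delete_cells(board, visited):
--     """Deletes visited cells and shifts the cells and columns (transpose-based)."""
--     grid = [row[:] for row in board]
--     for i, j in visited:
--         grid[i][j] = None
--     n = len(grid)
--     kept_cols = []
--     for col in zip(*grid):
--         ne = [c for c in col if c is not None]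
--         if ne:
--             kept_cols.append([None] * (n - len(ne)) + ne)
--     rows = [list(r) for r in zip(*kept_cols)]
--     return [row for row in rows if any(c is not None for c in row)]
-- ===== Notes on version B (the rewrite author's own statement) =====
-- stated objective: simpler
-- what changed: Replaces A's in-place index-juggling gravity (per-column index scans over new_board[k][j], a pop-from-the-end compaction loop writing cells back one index at a time, and an index-based empty-row/column selection) by a transpose-based pipeline: transpose via zip(*grid), compact-and-pad each column as a whole list, drop empty columns while building them, transpose back, drop all-None rows.
-- outside the precondition, e.g. on delete_cells([[], ['b', 'b', 'a']], []): A returns [['b', 'b', 'a']], B returns []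
import Mathlib
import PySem

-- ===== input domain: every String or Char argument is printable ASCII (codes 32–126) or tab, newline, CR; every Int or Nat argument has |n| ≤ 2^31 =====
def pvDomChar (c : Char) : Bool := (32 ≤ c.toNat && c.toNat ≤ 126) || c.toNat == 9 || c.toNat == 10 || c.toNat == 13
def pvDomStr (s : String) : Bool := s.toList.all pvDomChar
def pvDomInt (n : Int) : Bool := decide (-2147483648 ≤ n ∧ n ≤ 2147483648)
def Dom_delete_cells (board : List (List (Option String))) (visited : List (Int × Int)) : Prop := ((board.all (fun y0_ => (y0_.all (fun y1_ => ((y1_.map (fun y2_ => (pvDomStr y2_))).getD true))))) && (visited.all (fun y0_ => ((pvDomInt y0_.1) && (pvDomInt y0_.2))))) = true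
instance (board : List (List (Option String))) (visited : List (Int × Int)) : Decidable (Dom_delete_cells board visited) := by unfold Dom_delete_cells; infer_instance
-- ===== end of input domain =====

-- ===== PORT A =====
-- Shared marking phase (identical in both Pythons): copy the board and set every visited
-- cell to None.  pySetD/pyGetD give Python's negative-index wraparound; the out-of-range
-- case (IndexError in Python) is excluded by Pre_.
def pvMark (board : List (List (Option String))) (visited : List (Int × Int)) :
    List (List (Option String)) :=
  visited.foldl (fun nb p =>
    PySem.List.pySetD nb p.1 (PySem.List.pySetD (PySem.List.pyGetD nb p.1 []) p.2 none)) board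

-- new_board[k][j] read/write for the gravity loop (k, j produced by range, hence in range under Pre_)
def pvGet2 (nb : List (List (Option String))) (k j : Int) : Option String :=
  PySem.List.pyGetD (PySem.List.pyGetD nb k []) j none

def pvSet2 (nb : List (List (Option String))) (k j : Int) (v : Option String) :
    List (List (Option String)) :=
  PySem.List.pySetD nb k (PySem.List.pySetD (PySem.List.pyGetD nb k []) j v)

def delete_cells (board : List (List (Option String))) (visited : List (Int × Int)) :
    List (List (Option String)) :=
  let nb0 := pvMark board visited
  -- shift the cells vertically
  let nb1 := (PySem.List.pyRange 0 ((nb0.headD []).length : Int) 1).foldl (fun nb j =>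
    let ne := ((PySem.List.pyRange 0 (nb.length : Int) 1).filter
                (fun k => (pvGet2 nb k j).isSome)).map (fun k => pvGet2 nb k j)
    ((PySem.List.pyRange ((board.length : Int) - 1) (-1) (-1)).foldl (fun st k =>
        if st.2.isEmpty then (pvSet2 st.1 k j none, st.2)
        else (pvSet2 st.1 k j (st.2.getLast?.getD none), st.2.dropLast))
      (nb, ne)).1) nb0
  -- remove empty rows
  let nb2 := nb1.filter (fun row => row.any (fun cell => cell.isSome))
  -- shift columns to left
  let necols := (PySem.List.pyRange 0 ((nb2.headD []).length : Int) 1).filter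
    (fun c => nb2.any (fun row => (PySem.List.pyGetD row c none).isSome))
  (PySem.List.pyRange 0 (nb2.length : Int) 1).map
    (fun r => necols.map (fun c => PySem.List.pyGetD (PySem.List.pyGetD nb2 r []) c none))

-- ===== PORT B =====
-- list(zip(*rows)) on lists of cells (truncates at the shortest row, like zip)
def pvZipT (rows : List (List (Option String))) : List (List (Option String)) :=
  match rows with
  | [] => []
  | r0 :: rs =>
    (List.range (rs.foldl (fun m r => min m r.length) r0.length)).map
      (fun j => (r0 :: rs).map (fun r => r.getD j none))

def delete_cells_alt (board : List (List (Option String))) (visited : List (Int × Int)) :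
    List (List (Option String)) :=
  let grid := pvMark board visited
  let n := grid.length
  let keptCols := (pvZipT grid).foldl (fun acc col =>
    let ne := col.filter (fun c => c.isSome)
    if ne.isEmpty then acc else acc ++ [List.replicate (n - ne.length) none ++ ne]) []
  (pvZipT keptCols).filter (fun row => row.any (fun c => c.isSome))

-- ===== PRECONDITION & SPEC =====
def pvNorm (n : Nat) (i : Int) : Nat := (if i < 0 then i + n else i).toNat

-- Pre_ restricts to the game's natural domain: a nonempty rectangular board, visited
-- coordinates in Python's index range (negative wraparound included; out of range A raises
-- IndexError), and at least one unvisited non-None cell (on a fully emptied board A raises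
-- IndexError).  Ragged boards, on some of which A still returns, are malformed input outside
-- the natural domain of a rectangular game board.
def Pre_delete_cells (board : List (List (Option String))) (visited : List (Int × Int)) : Prop :=
  board ≠ [] ∧
  (∀ row ∈ board, row.length = (board.headD []).length) ∧
  (∀ p ∈ visited, PySem.Raise.InRange board.length p.1 ∧
      PySem.Raise.InRange (board.headD []).length p.2) ∧
  (∃ r < board.length, ∃ c < (board.headD []).length,
      ((board.getD r []).getD c none).isSome ∧
      ∀ p ∈ visited, ¬(pvNorm board.length p.1 = r ∧ pvNorm (board.headD []).length p.2 = c))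
instance (board : List (List (Option String))) (visited : List (Int × Int)) :
    Decidable (Pre_delete_cells board visited) := by unfold Pre_delete_cells; infer_instance

def pvWitness_delete_cells : List (List (Option String)) × (List (Int × Int)) :=
  ([[some "a", none], [some "b", some "c"]], [(0, 0), (-1, 1)])
def Spec_delete_cells (board : List (List (Option String))) (visited : List (Int × Int)) (out : List (List (Option String))) : Prop := out = delete_cells_alt board visited
instance (board : List (List (Option String))) (visited : List (Int × Int)) (out : List (List (Option String))) : Decidable (Spec_delete_cells board visited out) := by unfold Spec_delete_cells; infer_instance

-- ===== CLAIM (what is proved, stated in full; the proofs are below) =====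
def Claim_equal_delete_cells : Prop := ∀ (board : List (List (Option String))) (visited : List (Int × Int)), Dom_delete_cells board visited → Pre_delete_cells board visited → Spec_delete_cells board visited (delete_cells board visited)

-- ===== LEMMAS AND PROOFS =====

-- cell/column views used only by the proofs
def pg (nb : List (List (Option String))) (r c : Nat) : Option String := (nb.getD r []).getD c none

def colv (nb : List (List (Option String))) (c : Nat) : List (Option String) :=
  nb.map (fun row => row.getD c none)

def padc (N : Nat) (col : List (Option String)) : List (Option String) :=
  List.replicate (N - (col.filter (fun x => x.isSome)).length) none ++
    col.filter (fun x => x.isSome)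

-- named stages of the two ports (definitionally equal to the port bodies)
def innerFold (j : Nat) (m : Nat) (nb : List (List (Option String)))
    (ne : List (Option String)) :
    List (List (Option String)) × List (Option String) :=
  (PySem.List.pyRange ((m : Int) - 1) (-1) (-1)).foldl (fun st k =>
    if st.2.isEmpty then (pvSet2 st.1 k (j : Int) none, st.2)
    else (pvSet2 st.1 k (j : Int) (st.2.getLast?.getD none), st.2.dropLast)) (nb, ne)

def gravBody (N : Nat) (nb : List (List (Option String))) (j : Int) :
    List (List (Option String)) :=
  ((PySem.List.pyRange ((N : Int) - 1) (-1) (-1)).foldl (fun st k =>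
      if st.2.isEmpty then (pvSet2 st.1 k j none, st.2)
      else (pvSet2 st.1 k j (st.2.getLast?.getD none), st.2.dropLast))
    (nb, ((PySem.List.pyRange 0 (nb.length : Int) 1).filter
            (fun k => (pvGet2 nb k j).isSome)).map (fun k => pvGet2 nb k j))).1

def aTail (N : Nat) (nb0 : List (List (Option String))) : List (List (Option String)) :=
  let nb1 := (PySem.List.pyRange 0 ((nb0.headD []).length : Int) 1).foldl (gravBody N) nb0
  let nb2 := nb1.filter (fun row => row.any (fun cell => cell.isSome))
  let necols := (PySem.List.pyRange 0 ((nb2.headD []).length : Int) 1).filter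
    (fun c => nb2.any (fun row => (PySem.List.pyGetD row c none).isSome))
  (PySem.List.pyRange 0 (nb2.length : Int) 1).map
    (fun r => necols.map (fun c => PySem.List.pyGetD (PySem.List.pyGetD nb2 r []) c none))

def bTail (nb0 : List (List (Option String))) : List (List (Option String)) :=
  let n := nb0.length
  let keptCols := (pvZipT nb0).foldl (fun acc col =>
    let ne := col.filter (fun c => c.isSome)
    if ne.isEmpty then acc else acc ++ [List.replicate (n - ne.length) none ++ ne]) []
  (pvZipT keptCols).filter (fun row => row.any (fun c => c.isSome))

lemma delete_cells_eq_aTail (board : List (List (Option String))) (visited : List (Int × Int)) :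
    delete_cells board visited = aTail board.length (pvMark board visited) := rfl

lemma alt_eq_bTail (board : List (List (Option String))) (visited : List (Int × Int)) :
    delete_cells_alt board visited = bTail (pvMark board visited) := rfl

lemma headD_eq_getD_zero {α : Type} (l : List α) (d : α) : l.headD d = l.getD 0 d := by
  cases l <;> rfl

lemma pyIdx_lt (n : Nat) (i : Int) (k : Nat) (h : PySem.List.pyIdx? n i = some k) : k < n := by
  unfold PySem.List.pyIdx? at h
  split at h <;> simp_all <;> omega

lemma getD_set_list {α : Type} (l : List α) (k r : Nat) (x d : α) :
    (l.set k x).getD r d = if r = k ∧ k < l.length then x else l.getD r d := by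
  rw [List.getD_eq_getElem?_getD, List.getElem?_set]
  by_cases h1 : k = r
  · by_cases h2 : k < l.length
    · rw [if_pos h1, if_pos h2, if_pos (by exact ⟨h1.symm, h2⟩)]
      rfl
    · rw [if_pos h1, if_neg h2, if_neg (by tauto)]
      rw [List.getD_eq_getElem?_getD, List.getElem?_eq_none (by omega : l.length ≤ r)]
  · rw [if_neg h1, if_neg (by tauto), List.getD_eq_getElem?_getD]

lemma pyAccess_spec {α : Type} (xs : List α) (i : Int) (v d : α) :
    PySem.List.pySetD xs i v = xs ∨
    ∃ k, k < xs.length ∧ PySem.List.pySetD xs i v = xs.set k v ∧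
      PySem.List.pyGetD xs i d = xs.getD k d := by
  unfold PySem.List.pySetD PySem.List.pySet? PySem.List.pyGetD PySem.List.pyGet?
  rcases h : PySem.List.pyIdx? xs.length i with _ | k
  · left
    simp
  · right
    have hk := pyIdx_lt _ _ _ h
    exact ⟨k, hk, by simp, by simp [List.getD_eq_getElem?_getD, List.getElem?_eq_getElem hk]⟩

lemma pg_of_len_le (nb : List (List (Option String))) (r c : Nat) (h : nb.length ≤ r) :
    pg nb r c = none := by
  simp [pg, List.getD_eq_getElem?_getD, List.getElem?_eq_none h]

lemma getD_replicate_none (a b : Nat) :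
    (List.replicate a (none : Option String)).getD b none = none := by
  rw [List.getD_eq_getElem?_getD, List.getElem?_replicate]
  split_ifs <;> rfl

lemma colv_length (nb : List (List (Option String))) (c : Nat) :
    (colv nb c).length = nb.length := by simp [colv]

lemma padc_length (N : Nat) (col : List (Option String)) (h : col.length = N) :
    (padc N col).length = N := by
  have := List.length_filter_le (fun x => x.isSome) col
  simp only [padc, List.length_append, List.length_replicate]
  omega

lemma getD_of_len_le (l : List (Option String)) (r : Nat) (h : l.length ≤ r) :
    l.getD r none = none := by
  rw [List.getD_eq_getElem?_getD, List.getElem?_eq_none h]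
  rfl

lemma map_getD_range {α β : Type} (nb : List α) (d : α) (f : α → β) :
    nb.map f = (List.range nb.length).map (fun k => f (nb.getD k d)) := by
  apply List.ext_getElem?
  intro i
  by_cases hi : i < nb.length
  · rw [List.getElem?_map, List.getElem?_map, List.getElem?_range hi,
      List.getElem?_eq_getElem hi]
    simp [List.getD_eq_getElem?_getD, List.getElem?_eq_getElem hi]
  · rw [List.getElem?_map, List.getElem?_map, List.getElem?_eq_none (by omega : nb.length ≤ i),
      List.getElem?_eq_none (by simpa using (by omega : nb.length ≤ i))]
    rfl

lemma pvGet2_natCast (nb : List (List (Option String))) (k j : Nat) :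
    pvGet2 nb (k : Int) (j : Int) = pg nb k j := by
  simp [pvGet2, pg, PySem.List.pyGetD_natCast]

lemma pvMark_shape (board : List (List (Option String))) (visited : List (Int × Int)) :
    (pvMark board visited).length = board.length ∧
    ∀ r : Nat, ((pvMark board visited).getD r []).length = (board.getD r []).length := by
  unfold pvMark
  induction visited generalizing board with
  | nil => simp
  | cons p t ih =>
    simp only [List.foldl_cons]
    have hstep : ∀ (nb : List (List (Option String))) (i jv : Int),
        (PySem.List.pySetD nb i (PySem.List.pySetD (PySem.List.pyGetD nb i []) jv none)).length
          = nb.length ∧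
        ∀ r : Nat, ((PySem.List.pySetD nb i
            (PySem.List.pySetD (PySem.List.pyGetD nb i []) jv none)).getD r []).length
          = (nb.getD r []).length := by
      intro nb i jv
      refine ⟨PySem.List.length_pySetD .., ?_⟩
      intro r
      rcases pyAccess_spec nb i (PySem.List.pySetD (PySem.List.pyGetD nb i []) jv none) []
        with hcase | ⟨k, hk, hset, hget⟩
      · rw [hcase]
      · rw [hset, getD_set_list]
        split_ifs with h1
        · rw [PySem.List.length_pySetD, hget, h1.1]
        · rfl
    obtain ⟨ih1, ih2⟩ := ih (PySem.List.pySetD board p.1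
      (PySem.List.pySetD (PySem.List.pyGetD board p.1 []) p.2 none))
    exact ⟨ih1.trans (hstep board p.1 p.2).1,
      fun r => (ih2 r).trans ((hstep board p.1 p.2).2 r)⟩

lemma pvSet2_shape (nb : List (List (Option String))) (k j : Nat) (v : Option String) :
    (pvSet2 nb (k : Int) (j : Int) v).length = nb.length ∧
    ∀ r : Nat, ((pvSet2 nb (k : Int) (j : Int) v).getD r []).length = (nb.getD r []).length := by
  unfold pvSet2
  rw [PySem.List.pyGetD_natCast, PySem.List.pySetD_natCast, PySem.List.pySetD_natCast]
  refine ⟨by simp, ?_⟩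
  intro r
  rw [getD_set_list]
  split_ifs with h1
  · rw [List.length_set, h1.1]
  · rfl

lemma pg_pvSet2 (nb : List (List (Option String))) (k j : Nat) (v : Option String)
    (hk : k < nb.length) (hj : j < (nb.getD k []).length) (r c : Nat) :
    pg (pvSet2 nb (k : Int) (j : Int) v) r c = if r = k ∧ c = j then v else pg nb r c := by
  unfold pvSet2 pg
  rw [PySem.List.pyGetD_natCast, PySem.List.pySetD_natCast, PySem.List.pySetD_natCast]
  rw [getD_set_list]
  by_cases hrk : r = k
  · rw [if_pos ⟨hrk, hk⟩, getD_set_list]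
    by_cases hcj : c = j
    · rw [if_pos ⟨hcj, hj⟩, if_pos ⟨hrk, hcj⟩]
    · rw [if_neg (by tauto), if_neg (by tauto), hrk]
  · rw [if_neg (by tauto), if_neg (by tauto)]

lemma innerFold_zero (j : Nat) (nb : List (List (Option String))) (ne : List (Option String)) :
    innerFold j 0 nb ne = (nb, ne) := by
  unfold innerFold
  rw [show (((0 : Nat) : Int)) - 1 = -1 by norm_num,
    PySem.List.pyRange_neg_one_eq_nil (by norm_num)]
  rfl

lemma innerFold_succ (j m : Nat) (nb : List (List (Option String))) (ne : List (Option String)) :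
    innerFold j (m + 1) nb ne =
      (if ne.isEmpty then innerFold j m (pvSet2 nb (m : Int) (j : Int) none) ne
       else innerFold j m (pvSet2 nb (m : Int) (j : Int) (ne.getLast?.getD none)) ne.dropLast) := by
  unfold innerFold
  rw [show (((m + 1 : Nat) : Int)) - 1 = ((m : Nat) : Int) by push_cast; ring,
    PySem.List.pyRange_neg_one_cons (by omega), List.foldl_cons]
  by_cases hne : ne.isEmpty <;> simp [hne]

lemma inner_char (j : Nat) :
    ∀ (m : Nat) (nb : List (List (Option String))) (ne : List (Option String)),
      ne.length ≤ m → m ≤ nb.length → (∀ r, r < m → j < (nb.getD r []).length) →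
      (∀ r c : Nat, pg (innerFold j m nb ne).1 r c =
          if c = j ∧ r < m then (List.replicate (m - ne.length) none ++ ne).getD r none
          else pg nb r c) ∧
      (innerFold j m nb ne).1.length = nb.length ∧
      (∀ r : Nat, ((innerFold j m nb ne).1.getD r []).length = (nb.getD r []).length) := by
  intro m
  induction m with
  | zero =>
    intro nb ne h1 h2 h3
    rw [innerFold_zero]
    simp
  | succ m ih =>
    intro nb ne h1 h2 h3
    rw [innerFold_succ]
    by_cases hne : ne.isEmpty
    · have hne' : ne = [] := by simpa [List.isEmpty_iff] using hne
      subst hne'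
      rw [if_pos hne]
      have hsh := pvSet2_shape nb m j none
      have key := ih (pvSet2 nb (m : Int) (j : Int) none) [] (by simp)
        (by rw [hsh.1]; omega)
        (fun r hr => by rw [hsh.2 r]; exact h3 r (by omega))
      refine ⟨?_, key.2.1.trans hsh.1, fun r => (key.2.2 r).trans (hsh.2 r)⟩
      intro r c
      rw [key.1 r c, pg_pvSet2 nb m j none (by omega) (h3 m (by omega))]
      simp only [List.append_nil, List.length_nil, Nat.sub_zero, getD_replicate_none]
      split_ifs <;> first | rfl | omega
    · rw [if_neg hne]
      have hnenil : ne ≠ [] := by simpa [List.isEmpty_iff] using hne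
      have hlen1 : 1 ≤ ne.length := List.length_pos_of_ne_nil hnenil
      have hsh := pvSet2_shape nb m j (ne.getLast?.getD none)
      have key := ih (pvSet2 nb (m : Int) (j : Int) (ne.getLast?.getD none)) ne.dropLast
        (by simp [List.length_dropLast]; omega)
        (by rw [hsh.1]; omega)
        (fun r hr => by rw [hsh.2 r]; exact h3 r (by omega))
      refine ⟨?_, key.2.1.trans hsh.1, fun r => (key.2.2 r).trans (hsh.2 r)⟩
      intro r c
      rw [key.1 r c, pg_pvSet2 nb m j (ne.getLast?.getD none) (by omega) (h3 m (by omega))]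
      have hKeq : m - ne.dropLast.length = m + 1 - ne.length := by
        rw [List.length_dropLast]; omega
      by_cases hcj : c = j
      · by_cases hrm : r < m
        · rw [if_pos (show c = j ∧ r < m from ⟨hcj, hrm⟩),
            if_pos (show c = j ∧ r < m + 1 from ⟨hcj, by omega⟩)]
          rw [hKeq, List.getD_eq_getElem?_getD, List.getD_eq_getElem?_getD]
          by_cases hrK : r < m + 1 - ne.length
          · rw [List.getElem?_append_left (by simp; omega),
              List.getElem?_append_left (by simp; omega)]
          · rw [List.getElem?_append_right (by simp; omega),
              List.getElem?_append_right (by simp; omega)]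
            simp only [List.length_replicate, List.getElem?_dropLast]
            rw [if_pos (by omega)]
        · by_cases hrm2 : r = m
          · rw [if_neg (by tauto), if_pos (show r = m ∧ c = j from ⟨hrm2, hcj⟩),
              if_pos (show c = j ∧ r < m + 1 from ⟨hcj, by omega⟩)]
            rw [hrm2]
            rw [List.getD_eq_getElem?_getD,
              List.getElem?_append_right (by simp; omega)]
            simp only [List.length_replicate]
            have hidx : m - (m + 1 - ne.length) = ne.length - 1 := by omega
            rw [hidx, List.getElem?_eq_getElem (by omega : ne.length - 1 < ne.length)]
            rw [List.getLast?_eq_getElem?, List.getElem?_eq_getElem (by omega : ne.length - 1 < ne.length)]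
          · rw [if_neg (by omega), if_neg (by omega), if_neg (by omega)]
      · rw [if_neg (by tauto), if_neg (by tauto), if_neg (by tauto)]

lemma gravBody_eq_innerFold (N : Nat) (nb : List (List (Option String))) (y : Nat) :
    gravBody N nb (y : Int) =
      (innerFold y N nb (((PySem.List.pyRange 0 (nb.length : Int) 1).filter
          (fun k => (pvGet2 nb k (y : Int)).isSome)).map (fun k => pvGet2 nb k (y : Int)))).1 := rfl

lemma neArg_eq (nb : List (List (Option String))) (y : Nat) :
    ((PySem.List.pyRange 0 (nb.length : Int) 1).filter
        (fun k => (pvGet2 nb k (y : Int)).isSome)).map (fun k => pvGet2 nb k (y : Int)) =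
      (colv nb y).filter (fun x => x.isSome) := by
  rw [PySem.List.pyRange_zero_nat nb.length, List.filter_map, List.map_map]
  rw [show colv nb y = (List.range nb.length).map (fun k => (nb.getD k []).getD y none) from
    map_getD_range nb [] _, List.filter_map]
  simp [Function.comp_def, pvGet2_natCast, pg]

lemma gravBody_char (N W : Nat) (nb : List (List (Option String))) (y : Nat) (hy : y < W)
    (hN : nb.length = N) (hW : ∀ r, r < N → (nb.getD r []).length = W) :
    (gravBody N nb (y : Int)).length = N ∧
    (∀ r, r < N → ((gravBody N nb (y : Int)).getD r []).length = W) ∧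
    (∀ r c : Nat, pg (gravBody N nb (y : Int)) r c =
        if c = y then (padc N (colv nb y)).getD r none else pg nb r c) := by
  rw [gravBody_eq_innerFold, neArg_eq]
  have hLle : ((colv nb y).filter (fun x => x.isSome)).length ≤ N := by
    have := List.length_filter_le (fun x => x.isSome) (colv nb y)
    rw [colv_length, hN] at this
    exact this
  have key := inner_char y N nb ((colv nb y).filter (fun x => x.isSome))
    hLle (by omega) (fun r hr => by rw [hW r hr]; exact hy)
  refine ⟨key.2.1.trans hN, fun r hr => (key.2.2 r).trans (hW r hr), ?_⟩
  intro r c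
  rw [key.1 r c]
  by_cases hcj : c = y
  · subst hcj
    by_cases hrN : r < N
    · rw [if_pos ⟨rfl, hrN⟩, if_pos rfl]
      rfl
    · rw [if_neg (by tauto), if_pos rfl]
      rw [pg_of_len_le nb r c (by omega),
        getD_of_len_le _ _ (by rw [padc_length N _ (by rw [colv_length, hN])]; omega)]
  · rw [if_neg (by tauto), if_neg hcj]

lemma colv_congr (nb nb' : List (List (Option String))) (c : Nat)
    (hlen : nb'.length = nb.length) (h : ∀ r, pg nb' r c = pg nb r c) :
    colv nb' c = colv nb c := by
  apply List.ext_getElem?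
  intro i
  simp only [colv, List.getElem?_map]
  by_cases hi : i < nb.length
  · rw [List.getElem?_eq_getElem (by omega : i < nb'.length), List.getElem?_eq_getElem hi]
    simp only [Option.map_some, Option.some.injEq]
    have := h i
    simpa [pg, List.getD_eq_getElem?_getD, List.getElem?_eq_getElem (by omega : i < nb'.length),
      List.getElem?_eq_getElem hi] using this
  · rw [List.getElem?_eq_none (by omega : nb'.length ≤ i),
      List.getElem?_eq_none (by omega : nb.length ≤ i)]

lemma outer_char (N W : Nat) :
    ∀ (l : List Nat) (nb : List (List (Option String))),
      l.Nodup → (∀ x ∈ l, x < W) → nb.length = N → (∀ r, r < N → (nb.getD r []).length = W) →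
      (l.foldl (fun nb (y : Nat) => gravBody N nb (y : Int)) nb).length = N ∧
      (∀ r, r < N → ((l.foldl (fun nb (y : Nat) => gravBody N nb (y : Int)) nb).getD r []).length = W) ∧
      (∀ r c : Nat, pg (l.foldl (fun nb (y : Nat) => gravBody N nb (y : Int)) nb) r c =
          if c ∈ l then (padc N (colv nb c)).getD r none else pg nb r c) := by
  intro l
  induction l with
  | nil =>
    intro nb _ _ hN hW
    simp only [List.foldl_nil, List.not_mem_nil, if_false]
    exact ⟨hN, hW, fun _ _ => trivial⟩
  | cons y t ih =>
    intro nb hnd hmem hN hW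
    have hy : y < W := hmem y (by simp)
    have hstep := gravBody_char N W nb y hy hN hW
    simp only [List.foldl_cons]
    have key := ih (gravBody N nb (y : Int)) hnd.of_cons
      (fun x hx => hmem x (by simp [hx])) hstep.1 hstep.2.1
    refine ⟨key.1, key.2.1, ?_⟩
    intro r c
    rw [key.2.2 r c]
    by_cases hct : c ∈ t
    · have hcy : c ≠ y := by
        intro hcy
        subst hcy
        exact (List.nodup_cons.mp hnd).1 hct
      rw [if_pos hct, if_pos (by simp [hct])]
      have hcv : colv (gravBody N nb (y : Int)) c = colv nb c := by
        apply colv_congr _ _ _ (by rw [hstep.1, hN])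
        intro r'
        rw [hstep.2.2 r' c, if_neg hcy]
      rw [hcv]
    · rw [if_neg hct, hstep.2.2 r c]
      by_cases hcy : c = y
      · subst hcy
        rw [if_pos rfl, if_pos (by simp)]
      · rw [if_neg hcy, if_neg (by simp [hcy, hct])]

lemma eq_range_map_of_pg (G : List (List (Option String))) (N W : Nat)
    (f : Nat → Nat → Option String) (hlen : G.length = N)
    (hrow : ∀ r, r < N → (G.getD r []).length = W)
    (hpg : ∀ r c, r < N → c < W → pg G r c = f r c) :
    G = (List.range N).map (fun r => (List.range W).map (fun c => f r c)) := by
  apply List.ext_getElem?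
  intro i
  by_cases hi : i < N
  · rw [List.getElem?_eq_getElem (by omega : i < G.length), List.getElem?_map,
      List.getElem?_range hi]
    simp only [Option.map_some, Option.some.injEq]
    have hGi : G[i] = G.getD i [] := by
      simp [List.getD_eq_getElem?_getD, List.getElem?_eq_getElem (by omega : i < G.length)]
    have hrl : G[i].length = W := by rw [hGi]; exact hrow i hi
    apply List.ext_getElem?
    intro c
    by_cases hc : c < W
    · rw [List.getElem?_eq_getElem (by omega : c < G[i].length), List.getElem?_map,
        List.getElem?_range hc]
      simp only [Option.map_some, Option.some.injEq]
      have := hpg i c hi hc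
      rw [pg, ← hGi, List.getD_eq_getElem?_getD,
        List.getElem?_eq_getElem (by omega : c < G[i].length)] at this
      exact this
    · rw [List.getElem?_eq_none (by omega : G[i].length ≤ c),
        List.getElem?_eq_none (by simp; omega)]
  · rw [List.getElem?_eq_none (by omega : G.length ≤ i),
      List.getElem?_eq_none (by simp; omega)]

lemma foldl_min_const (W : Nat) :
    ∀ (l : List (List (Option String))), (∀ x ∈ l, x.length = W) →
      l.foldl (fun m r => min m r.length) W = W := by
  intro l
  induction l with
  | nil => intro _; rfl
  | cons x t ih =>
    intro h
    simp only [List.foldl_cons, h x (by simp), min_self]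
    exact ih (fun x hx => h x (by simp [hx]))

lemma zipT_of_rect (nb : List (List (Option String))) (W : Nat) (hne : nb ≠ [])
    (h : ∀ row ∈ nb, row.length = W) :
    pvZipT nb = (List.range W).map (fun j => colv nb j) := by
  cases nb with
  | nil => exact absurd rfl hne
  | cons r0 rs =>
    simp only [pvZipT]
    rw [show r0.length = W from h r0 (by simp),
      foldl_min_const W rs (fun x hx => h x (by simp [hx]))]
    rfl

lemma padc_getD_of_empty (N : Nat) (col : List (Option String)) (r : Nat)
    (h : col.filter (fun x => x.isSome) = []) : (padc N col).getD r none = none := by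
  simp only [padc, h, List.length_nil, Nat.sub_zero, List.append_nil]
  exact getD_replicate_none N r

lemma padc_last (N : Nat) (col : List (Option String)) (hc : col.length = N)
    (hne : col.filter (fun x => x.isSome) ≠ []) :
    0 < N ∧ (((padc N col).getD (N - 1) none).isSome = true) := by
  have hL1 : 0 < (col.filter (fun x => x.isSome)).length := List.length_pos_of_ne_nil hne
  have hLN : (col.filter (fun x => x.isSome)).length ≤ N := by
    have := List.length_filter_le (fun x => x.isSome) col
    omega
  refine ⟨by omega, ?_⟩
  rw [padc, List.getD_eq_getElem?_getD, List.getElem?_append_right (by simp; omega)]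
  simp only [List.length_replicate]
  have hidx : N - 1 - (N - (col.filter (fun x => x.isSome)).length)
      = (col.filter (fun x => x.isSome)).length - 1 := by omega
  rw [hidx, List.getElem?_eq_getElem (by omega)]
  simp only [Option.getD_some]
  have hlt : (col.filter (fun x => x.isSome)).length - 1 < (col.filter (fun x => x.isSome)).length := by
    omega
  exact List.of_mem_filter (List.getElem_mem hlt)

lemma map_range_getD_sel (nb2 : List (List (Option String))) (idx : List Nat) :
    (List.range nb2.length).map (fun r => idx.map (fun c => (nb2.getD r []).getD c none))
    = nb2.map (fun row => idx.map (fun c => row.getD c none)) :=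
  (map_getD_range nb2 [] (fun row => idx.map (fun c => row.getD c none))).symm

lemma tails_eq (nb0 : List (List (Option String))) (N W : Nat)
    (hN : nb0.length = N) (hNpos : 0 < N)
    (hW : ∀ r, r < N → (nb0.getD r []).length = W)
    (hW0 : (nb0.headD []).length = W) :
    aTail N nb0 = bTail nb0 := by
  have hnb0ne : nb0 ≠ [] := by
    intro h
    rw [h] at hN
    simp at hN
    omega
  have hrowsW : ∀ row ∈ nb0, row.length = W := by
    intro row hrow
    obtain ⟨i, hi, hrw⟩ := List.mem_iff_getElem.mp hrow
    have hgd : nb0.getD i [] = row := by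
      rw [List.getD_eq_getElem?_getD, List.getElem?_eq_getElem hi, Option.getD_some, hrw]
    rw [← hgd]
    exact hW i (by omega)
  -- the gravity result, characterised column-wise
  have houter := outer_char N W (List.range W) nb0 (List.nodup_range)
    (fun x hx => List.mem_range.mp hx) hN hW
  have s1 : (PySem.List.pyRange 0 ((nb0.headD []).length : Int) 1).foldl (gravBody N) nb0 =
      (List.range N).map (fun r =>
        (List.range W).map (fun c => (padc N (colv nb0 c)).getD r none)) := by
    rw [hW0, PySem.List.pyRange_zero_nat W, List.foldl_map]
    exact eq_range_map_of_pg _ N W _ houter.1 houter.2.1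
      (fun r c hr hc => by rw [houter.2.2 r c, if_pos (List.mem_range.mpr hc)])
  -- B's kept columns
  have s2 : (pvZipT nb0).foldl (fun acc col =>
        let ne := col.filter (fun c => c.isSome)
        if ne.isEmpty then acc else acc ++ [List.replicate (nb0.length - ne.length) none ++ ne]) []
      = ((List.range W).filter
          (fun j => !((colv nb0 j).filter (fun x => x.isSome)).isEmpty)).map
          (fun j => padc N (colv nb0 j)) := by
    rw [zipT_of_rect nb0 W hnb0ne hrowsW]
    have hfun : (fun (acc : List (List (Option String))) col =>
        let ne := col.filter (fun c => c.isSome)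
        if ne.isEmpty then acc else acc ++ [List.replicate (nb0.length - ne.length) none ++ ne])
        = fun acc col =>
          if (!(col.filter (fun x => x.isSome)).isEmpty) then acc ++ [padc N col] else acc := by
      funext acc col
      by_cases h : (col.filter (fun c => c.isSome)).isEmpty
      · simp [h]
      · simp [h, padc, hN]
    rw [hfun, PySem.List.foldl_append_if
      (fun col => !(col.filter (fun x => x.isSome)).isEmpty)
      (fun col => padc N col) ((List.range W).map (fun j => colv nb0 j)) [],
      List.nil_append, List.filter_map, List.map_map]
    rfl
  -- abbreviations
  set FR : Nat → List (Option String) :=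
    fun r => (List.range W).map (fun c => (padc N (colv nb0 c)).getD r none) with hFR
  set keptIdx : List Nat :=
    (List.range W).filter (fun j => !((colv nb0 j).filter (fun x => x.isSome)).isEmpty)
    with hkeptIdx
  set keptRow : Nat → List (Option String) :=
    fun r => keptIdx.map (fun c => (padc N (colv nb0 c)).getD r none) with hkeptRow
  have hkmem : ∀ c ∈ keptIdx, c < W ∧ (colv nb0 c).filter (fun x => x.isSome) ≠ [] := by
    intro c hc
    have hmf := List.mem_filter.mp (hkeptIdx ▸ hc)
    refine ⟨List.mem_range.mp hmf.1, ?_⟩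
    simpa [List.isEmpty_iff] using hmf.2
  have hkept_of_isSome : ∀ (c r : Nat), c < W →
      (((padc N (colv nb0 c)).getD r none).isSome = true) → c ∈ keptIdx := by
    intro c r hcW hs
    rw [hkeptIdx, List.mem_filter]
    refine ⟨List.mem_range.mpr hcW, ?_⟩
    by_cases hemp : ((colv nb0 c).filter (fun x => x.isSome)).isEmpty
    · rw [padc_getD_of_empty N _ r (List.isEmpty_iff.mp hemp)] at hs
      simp at hs
    · simp [hemp]
  -- entry of FR at a column index below W
  have hFRget : ∀ (r c : Nat), c < W → (FR r).getD c none = (padc N (colv nb0 c)).getD r none := by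
    intro r c hcW
    rw [hFR]
    rw [List.getD_eq_getElem?_getD, List.getElem?_map, List.getElem?_range hcW]
    simp
  -- row survival is the same on full and on kept columns
  have hPF : ∀ r, (FR r).any (fun cell => cell.isSome) = (keptRow r).any (fun cell => cell.isSome) := by
    intro r
    rw [Bool.eq_iff_iff]
    simp only [hFR, hkeptRow, List.any_map, List.any_eq_true, Function.comp]
    constructor
    · rintro ⟨c, hc, hs⟩
      exact ⟨c, hkept_of_isSome c r (List.mem_range.mp hc) hs, hs⟩
    · rintro ⟨c, hc, hs⟩
      exact ⟨c, List.mem_range.mpr (hkmem c hc).1, hs⟩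
  simp only [aTail, bTail]
  rw [s1, s2]
  rw [List.filter_map]
  simp only [Function.comp_def]
  by_cases hk : keptIdx = []
  · -- no column survives: both sides are empty
    have hnb2 : (List.range N).filter (fun x => (FR x).any (fun cell => cell.isSome)) = [] := by
      rw [List.filter_eq_nil_iff]
      intro r _
      rw [hPF r, hkeptRow]
      simp [hk]
    rw [hnb2, hk]
    simp [pvZipT]
  · -- some column survives
    obtain ⟨j0, hj0⟩ := List.exists_mem_of_ne_nil _ hk
    have hj0f := hkmem j0 hj0
    have hlast0 := padc_last N (colv nb0 j0) (by rw [colv_length, hN]) hj0f.2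
    have hsurv : (FR (N - 1)).any (fun cell => cell.isSome) = true := by
      rw [hPF (N - 1), hkeptRow]
      simp only [List.any_map, List.any_eq_true, Function.comp_def]
      exact ⟨j0, hj0, hlast0.2⟩
    have hmemN1 : FR (N - 1) ∈ List.map FR ((List.range N).filter
        (fun x => (FR x).any (fun cell => cell.isSome))) :=
      List.mem_map_of_mem (List.mem_filter.mpr ⟨List.mem_range.mpr (by omega), hsurv⟩)
    have hnb2ne : List.map FR ((List.range N).filter
        (fun x => (FR x).any (fun cell => cell.isSome))) ≠ [] :=
      List.ne_nil_of_mem hmemN1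
    -- head row of the filtered board has width W
    have hhead : ((List.map FR ((List.range N).filter
        (fun x => (FR x).any (fun cell => cell.isSome)))).headD []).length = W := by
      rcases hcons : List.map FR ((List.range N).filter
          (fun x => (FR x).any (fun cell => cell.isSome))) with _ | ⟨h0, tl⟩
      · exact absurd hcons hnb2ne
      · have hm : h0 ∈ List.map FR ((List.range N).filter
            (fun x => (FR x).any (fun cell => cell.isSome))) := by
          rw [hcons]
          simp
        obtain ⟨r, _, hr⟩ := List.mem_map.mp hm
        simp only [List.headD_cons]
        rw [← hr, hFR]
        simp
    -- the columns A keeps are exactly keptIdx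
    have hq : ((List.range W).filter (fun c => (List.map FR ((List.range N).filter
          (fun x => (FR x).any (fun cell => cell.isSome)))).any
          (fun row => (row.getD c none).isSome))) = keptIdx := by
      rw [hkeptIdx]
      apply List.filter_congr
      intro c hc
      have hcW : c < W := List.mem_range.mp hc
      rw [Bool.eq_iff_iff]
      constructor
      · intro hany
        obtain ⟨row, hrow, hs⟩ := List.any_eq_true.mp hany
        obtain ⟨r, _, hr⟩ := List.mem_map.mp hrow
        rw [← hr, hFRget r c hcW] at hs
        have hmem := hkept_of_isSome c r hcW hs
        have hmem2 := List.mem_filter.mp (hkeptIdx ▸ hmem)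
        exact hmem2.2
      · intro hkept
        have hcmem : c ∈ keptIdx := by
          rw [hkeptIdx, List.mem_filter]
          exact ⟨hc, hkept⟩
        have hlastc := padc_last N (colv nb0 c) (by rw [colv_length, hN]) (hkmem c hcmem).2
        apply List.any_eq_true.mpr
        refine ⟨FR (N - 1), hmemN1, ?_⟩
        rw [hFRget (N - 1) c hcW]
        exact hlastc.2
    rw [hhead, PySem.List.pyRange_zero_nat W, List.filter_map]
    simp only [Function.comp_def, PySem.List.pyGetD_natCast]
    rw [hq]
    -- A's final comprehension: select keptIdx from every surviving row
    rw [PySem.List.pyRange_zero_nat (List.map FR ((List.range N).filter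
        (fun x => (FR x).any (fun cell => cell.isSome)))).length, List.map_map]
    simp only [Function.comp_def, List.map_map, PySem.List.pyGetD_natCast]
    rw [map_range_getD_sel (List.map FR ((List.range N).filter
        (fun x => (FR x).any (fun cell => cell.isSome)))) keptIdx]
    rw [List.map_map]
    simp only [Function.comp_def]
    -- B's transpose of the kept columns
    rw [zipT_of_rect (keptIdx.map (fun j => padc N (colv nb0 j))) N
      (by simp [hk]) ?rows]
    case rows =>
      intro row hrow
      obtain ⟨j, hj, hjr⟩ := List.mem_map.mp hrow
      rw [← hjr]
      exact padc_length N _ (by rw [colv_length, hN])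
    have hcv : (fun r => colv (keptIdx.map (fun j => padc N (colv nb0 j))) r) = keptRow := by
      funext r
      rw [hkeptRow]
      simp [colv, List.map_map, Function.comp_def]
    rw [hcv, List.filter_map]
    simp only [Function.comp_def]
    have hfilt : ((List.range N).filter (fun x => (FR x).any (fun cell => cell.isSome)))
        = ((List.range N).filter (fun x => (keptRow x).any (fun cell => cell.isSome))) :=
      List.filter_congr (fun r _ => hPF r)
    rw [hfilt]
    apply List.map_congr_left
    intro r _
    rw [hkeptRow]
    apply List.map_congr_left
    intro c hcmem
    exact hFRget r c (hkmem c hcmem).1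

-- ===== VERDICT (by name: the statement is the Claim_ definition above) =====
theorem delete_cells_spec : Claim_equal_delete_cells := by
  intro board visited _ hpre
  obtain ⟨hb, hrect, -, -⟩ := hpre
  unfold Spec_delete_cells
  rw [delete_cells_eq_aTail, alt_eq_bTail]
  have hms := pvMark_shape board visited
  have hNpos : 0 < board.length := List.length_pos_of_ne_nil hb
  have hW : ∀ r, r < board.length →
      ((pvMark board visited).getD r []).length = (board.headD []).length := by
    intro r hr
    rw [hms.2 r]
    have hmem : board.getD r [] ∈ board := by
      rw [List.getD_eq_getElem?_getD, List.getElem?_eq_getElem hr, Option.getD_some]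
      exact List.getElem_mem hr
    exact hrect _ hmem
  have hW0 : ((pvMark board visited).headD []).length = (board.headD []).length := by
    rw [headD_eq_getD_zero, hms.2 0, ← headD_eq_getD_zero]
  exact tails_eq (pvMark board visited) board.length (board.headD []).length hms.1 hNpos hW hW0
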